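-- pv_equiv track=rewrite | github.com/embed111/workflow_code | src/workflow_app/server/services/release_boundary_service.py | _suggest_push_batches
-- ===== SOURCE A (Python) =====
-- def _release_batch_label(path_text: str) -> str:
--     path = str(path_text or "").replace("\\", "/").lstrip("./")
--     if path.startswith("scripts/acceptance/"):
--         return "gate/acceptance 收口"
--     if path.startswith("src/workflow_app/server/"):
--         return "backend 真相收口"
--     if path.startswith("src/workflow_app/web_client/") or path.startswith(
--         "src/workflow_app/server/presentation/templates/"
--     ):
--         return "frontend UCD 切片"
--     if path.startswith("logs/"):
--         return "logs/证据确认"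
--     head = path.split("/", 1)[0].strip()
--     if head:
--         return f"{head} 杂项确认"
--     return "杂项确认"
--
-- def _suggest_push_batches(changed_paths: list[str]) -> list[str]:
--     order = [
--         "gate/acceptance 收口",
--         "backend 真相收口",
--         "frontend UCD 切片",
--         "logs/证据确认",
--     ]
--     seen: set[str] = set()
--     extra: list[str] = []
--     for path in changed_paths:
--         label = _release_batch_label(path)
--         if label in seen:
--             continue
--         seen.add(label)
--         if label not in order:
--             extra.append(label)
--     ordered = [label for label in order if label in seen]
--     ordered.extend(sorted(extra))
--     return ordered
-- ===== SOURCE B (Python) =====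
-- def _release_batch_label(path_text: str) -> str:
--     path = str(path_text or "").replace("\\", "/").lstrip("./")
--     if path.startswith("scripts/acceptance/"):
--         return "gate/acceptance 收口"
--     if path.startswith("src/workflow_app/server/"):
--         return "backend 真相收口"
--     if path.startswith("src/workflow_app/web_client/") or path.startswith(
--         "src/workflow_app/server/presentation/templates/"
--     ):
--         return "frontend UCD 切片"
--     if path.startswith("logs/"):
--         return "logs/证据确认"
--     head = path.split("/", 1)[0].strip()
--     if head:
--         return f"{head} 杂项确认"
--     return "杂项确认"
--
-- def _suggest_push_batches(changed_paths: list[str]) -> list[str]: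
--     order = [
--         "gate/acceptance 收口",
--         "backend 真相收口",
--         "frontend UCD 切片",
--         "logs/证据确认",
--     ]
--     rank = {label: i for i, label in enumerate(order)}
--     labels = {_release_batch_label(path) for path in changed_paths}
--     return sorted(labels, key=lambda l: (rank.get(l, len(order)), "" if l in rank else l))
-- ===== Notes on version B (the rewrite author's own statement) =====
-- stated objective: simpler
-- what changed: Replaces A's stateful seen/extra accumulation plus order-filter-and-concat with a rank table and a single composite-key sort over the distinct label set.
import Mathlib
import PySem

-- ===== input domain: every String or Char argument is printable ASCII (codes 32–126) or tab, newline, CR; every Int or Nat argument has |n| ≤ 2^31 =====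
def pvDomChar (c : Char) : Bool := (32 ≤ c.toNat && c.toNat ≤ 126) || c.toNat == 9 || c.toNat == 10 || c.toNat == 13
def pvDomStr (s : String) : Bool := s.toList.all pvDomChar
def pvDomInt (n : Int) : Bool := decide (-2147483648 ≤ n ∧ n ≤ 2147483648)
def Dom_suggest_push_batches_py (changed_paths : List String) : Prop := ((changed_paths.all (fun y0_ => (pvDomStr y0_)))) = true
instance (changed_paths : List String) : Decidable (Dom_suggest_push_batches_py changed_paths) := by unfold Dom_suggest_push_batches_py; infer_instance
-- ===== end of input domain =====

-- B replaces A's stateful seen/extra single pass + order-filter + concat by a rank table and one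
-- composite-key sort over the distinct label set (objective: simpler decomposition, same cost).

-- ===== PORT A =====
-- shared helper _release_batch_label (textually identical in A and in B; B keeps it unchanged)
def release_batch_label (path_text : String) : String :=
  -- `str(path_text or "")` on a str argument is the identity unless the string is empty
  let p0 := if path_text == "" then "" else path_text
  let p1 := PySem.Str.replace p0 "\\" "/"
  -- `.lstrip("./")`: drop leading characters among {'.', '/'} (hand port, exact)
  let path := String.ofList (p1.toList.dropWhile (fun c => c == '.' || c == '/'))
  if PySem.Str.startswith path "scripts/acceptance/" then "gate/acceptance 收口"
  else if PySem.Str.startswith path "src/workflow_app/server/" then "backend 真相收口"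
  else if PySem.Str.startswith path "src/workflow_app/web_client/"
       || PySem.Str.startswith path "src/workflow_app/server/presentation/templates/" then "frontend UCD 切片"
  else if PySem.Str.startswith path "logs/" then "logs/证据确认"
  else
    -- path.split("/", 1)[0]: the split list is never empty, so [0] is its head
    let head := PySem.Str.strip (((PySem.Str.splitMax? path "/" 1).getD []).headD "")
    if head != "" then head ++ " 杂项确认" else "杂项确认"

-- the shared `order` literal of both Pythons
def pvOrder : List String :=
  ["gate/acceptance 收口", "backend 真相收口", "frontend UCD 切片", "logs/证据确认"]

def suggest_push_batches_py (changed_paths : List String) : List String :=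
  let order := pvOrder
  let res := changed_paths.foldl
    (fun (st : PySem.Set String × List String) path =>
      let label := release_batch_label path
      if PySem.Set.contains st.1 label then st
      else (PySem.Set.add st.1 label,
            if order.contains label then st.2 else st.2 ++ [label]))
    (PySem.Set.empty, [])
  let ordered := order.filter (fun label => PySem.Set.contains res.1 label)
  ordered ++ PySem.List.sorted res.2 (fun x => x)

-- ===== PORT B =====
def suggest_push_batches_py_alt (changed_paths : List String) : List String :=
  let order := pvOrder
  let rank : PySem.Dict String Int :=
    (PySem.List.enumerate order).foldl (fun d il => PySem.Dict.insert d il.2 il.1) PySem.Dict.empty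
  let labels : PySem.Set String := PySem.Set.ofList (changed_paths.map release_batch_label)
  PySem.List.sorted2 labels
    (fun l => PySem.Dict.getD rank l (order.length : Int))
    (fun l => if PySem.Dict.contains rank l then "" else l)

-- ===== PRECONDITION & SPEC =====
def Spec_suggest_push_batches_py (changed_paths : List String) (out : List String) : Prop := out = suggest_push_batches_py_alt changed_paths
instance (changed_paths : List String) (out : List String) : Decidable (Spec_suggest_push_batches_py changed_paths out) := by unfold Spec_suggest_push_batches_py; infer_instance

-- ===== CLAIM (what is proved, stated in full; the proofs are below) =====
def Claim_equal_suggest_push_batches_py : Prop := ∀ (changed_paths : List String), Dom_suggest_push_batches_py changed_paths → Spec_suggest_push_batches_py changed_paths (suggest_push_batches_py changed_paths)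

-- ===== LEMMAS AND PROOFS =====

-- B's rank dict, reduced to a literal
def pvRank : PySem.Dict String Int :=
  ⟨[("gate/acceptance 收口", 0), ("backend 真相收口", 1), ("frontend UCD 切片", 2), ("logs/证据确认", 3)]⟩

-- B's two key components
def pvK1 (l : String) : Int := PySem.Dict.getD pvRank l 4
def pvK2 (l : String) : String := if PySem.Dict.contains pvRank l then "" else l
def pvKeyL (l : String) : Lex (Int × String) := toLex (pvK1 l, pvK2 l)

lemma altB_eq (cps : List String) :
    suggest_push_batches_py_alt cps
      = PySem.List.sorted2 (PySem.Set.ofList (cps.map release_batch_label)) pvK1 pvK2 := rfl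

-- sorted2 with an (Int, String) key is sorted with the lexicographic key
lemma sorted2_eq_sorted_lex {α : Type} (xs : List α) (k1 : α → Int) (k2 : α → String) :
    PySem.List.sorted2 xs k1 k2 = PySem.List.sorted xs (fun x => toLex (k1 x, k2 x)) := by
  unfold PySem.List.sorted2 PySem.List.sorted
  simp only
  congr 1
  funext acc x
  congr 1
  funext a b
  simp only [Prod.Lex.lt_iff, ofLex_toLex]
  rcases lt_trichotomy (k1 a) (k1 b) with h | h | h
  · simp [h, not_lt.mpr h.le]
  · simp [h]
  · simp [not_lt.mpr h.le, h, ne_of_gt h]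

-- A's loop: the invariant extra = seen.filter (∉ order)
def pvQ (l : String) : Bool := !(pvOrder.contains l)

lemma foldA_inv (ps : List String) (s : List String) :
    ps.foldl
      (fun (st : PySem.Set String × List String) path =>
        let label := release_batch_label path
        if PySem.Set.contains st.1 label then st
        else (PySem.Set.add st.1 label,
              if pvOrder.contains label then st.2 else st.2 ++ [label]))
      (s, s.filter pvQ)
    = (ps.foldl (fun t p => PySem.Set.add t (release_batch_label p)) s,
       (ps.foldl (fun t p => PySem.Set.add t (release_batch_label p)) s).filter pvQ) := by
  induction ps generalizing s with
  | nil => rfl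
  | cons p ps ih =>
    simp only [List.foldl_cons]
    by_cases h : release_batch_label p ∈ s
    · rw [show (PySem.Set.contains s (release_batch_label p)) = true from (PySem.Set.contains_iff _ _).mpr h]
      simp only [PySem.Set.add_of_mem h]
      exact ih s
    · rw [show (PySem.Set.contains s (release_batch_label p)) = false from
        by simpa using (fun hc => h ((PySem.Set.contains_iff _ _).mp hc))]
      simp only [Bool.false_eq_true, if_false, PySem.Set.add_of_not_mem h]
      have hkey : (if pvOrder.contains (release_batch_label p) = true then s.filter pvQ
            else s.filter pvQ ++ [release_batch_label p])
          = (s ++ [release_batch_label p]).filter pvQ := by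
        by_cases hm : release_batch_label p ∈ pvOrder <;>
          simp [List.filter_append, List.filter, pvQ, hm]
      rw [hkey]
      exact ih (s ++ [release_batch_label p])

lemma portA_eq (cps : List String) :
    suggest_push_batches_py cps
      = pvOrder.filter (fun l => PySem.Set.contains (PySem.Set.ofList (cps.map release_batch_label)) l)
        ++ PySem.List.sorted ((PySem.Set.ofList (cps.map release_batch_label)).filter pvQ) (fun x => x) := by
  unfold suggest_push_batches_py
  simp only
  have h0 : ((PySem.Set.empty : PySem.Set String), ([] : List String))
      = ((PySem.Set.empty : PySem.Set String), (PySem.Set.empty : PySem.Set String).filter pvQ) := rfl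
  rw [h0, foldA_inv]
  have hfold : cps.foldl (fun t p => PySem.Set.add t (release_batch_label p)) PySem.Set.empty
      = PySem.Set.ofList (cps.map release_batch_label) := by
    rw [← PySem.Set.update_map_eq_foldl_add]
    exact PySem.Set.update_nil_left _
  rw [hfold]

-- key facts about pvK1/pvK2 on and off pvOrder
lemma key_facts_not_mem (b : String) (hb : b ∉ pvOrder) : pvK1 b = 4 ∧ pvK2 b = b := by
  simp only [pvOrder, List.mem_cons, List.not_mem_nil, or_false, not_or] at hb
  obtain ⟨h0, h1, h2, h3⟩ := hb
  constructor
  · simp [pvK1, pvRank, PySem.Dict.getD, PySem.Dict.get?, Ne.symm h0, Ne.symm h1, Ne.symm h2, Ne.symm h3]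
  · simp [pvK2, pvRank, PySem.Dict.contains, Ne.symm h0, Ne.symm h1, Ne.symm h2, Ne.symm h3]

lemma key_lt_four_of_mem (a : String) (ha : a ∈ pvOrder) : pvK1 a < 4 := by
  simp only [pvOrder, List.mem_cons, List.not_mem_nil, or_false] at ha
  rcases ha with h | h | h | h <;> subst h <;> decide

lemma pairwise_keyL_order : pvOrder.Pairwise (fun a b => pvKeyL a < pvKeyL b) := by decide

-- the central identity: for the distinct label set S, A's ordered-concat list IS sorted(S, lexkey)
lemma main_eq (S : List String) (hS : S.Nodup) :
    pvOrder.filter (fun l => PySem.Set.contains S l) ++ PySem.List.sorted (S.filter pvQ) (fun x => x)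
      = PySem.List.sorted S (fun x => toLex (pvK1 x, pvK2 x)) := by
  apply (PySem.List.sorted_eq_of_perm_of_pairwise_lt S _ _ _ _).symm
  · -- permutation
    have h1 : (pvOrder.filter (fun l => PySem.Set.contains S l)).Perm
        (S.filter (fun l => pvOrder.contains l)) := by
      rw [List.perm_ext_iff_of_nodup ((by decide : pvOrder.Nodup).filter _) (hS.filter _)]
      intro a
      simp only [List.mem_filter, PySem.Set.contains_eq_listContains]
      constructor
      · rintro ⟨ho, hs⟩; exact ⟨by simpa using hs, by simpa using ho⟩
      · rintro ⟨hs, ho⟩; exact ⟨by simpa using ho, by simpa using hs⟩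
    have h2 : (PySem.List.sorted (S.filter pvQ) (fun x => x)).Perm (S.filter pvQ) :=
      PySem.List.sorted_perm _ _ _
    refine List.Perm.trans (List.Perm.append h1 h2) ?_
    have hq : pvQ = fun l => !(pvOrder.contains l) := rfl
    rw [hq]
    exact List.filter_append_perm (fun l => pvOrder.contains l) S
  · -- pairwise strict lexicographic increase
    rw [List.pairwise_append]
    refine ⟨?_, ?_, ?_⟩
    · exact pairwise_keyL_order.sublist List.filter_sublist
    · -- extras: equal first component 4, strictly increasing second component
      have hnd : (PySem.List.sorted (S.filter pvQ) (fun x => x)).Nodup :=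
        ((PySem.List.sorted_perm _ _ _).nodup_iff).mpr (hS.filter _)
      have hle : (PySem.List.sorted (S.filter pvQ) (fun x => x)).Pairwise (· ≤ ·) := by
        have := PySem.List.sorted_pairwise (S.filter pvQ) (fun x : String => x)
        simpa using this
      have hlt : (PySem.List.sorted (S.filter pvQ) (fun x => x)).Pairwise (· < ·) :=
        (hle.sortedLE.sortedLT_of_nodup hnd).pairwise
      refine hlt.imp_of_mem ?_
      intro a b ha hb hab
      have ha' : a ∉ pvOrder := by
        have := ((PySem.List.mem_sorted _ _ _ _).mp ha)
        simp only [List.mem_filter, pvQ] at this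
        simpa using this.2
      have hb' : b ∉ pvOrder := by
        have := ((PySem.List.mem_sorted _ _ _ _).mp hb)
        simp only [List.mem_filter, pvQ] at this
        simpa using this.2
      obtain ⟨ha1, ha2⟩ := key_facts_not_mem a ha'
      obtain ⟨hb1, hb2⟩ := key_facts_not_mem b hb'
      rw [Prod.Lex.lt_iff]
      simp only [ofLex_toLex]
      right
      exact ⟨by rw [ha1, hb1], by rw [ha2, hb2]; exact hab⟩
    · -- cross: order labels strictly before extras on the first component
      intro a ha b hb
      have ha' : a ∈ pvOrder := List.mem_of_mem_filter ha
      have hb' : b ∉ pvOrder := by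
        have := ((PySem.List.mem_sorted _ _ _ _).mp hb)
        simp only [List.mem_filter, pvQ] at this
        simpa using this.2
      rw [Prod.Lex.lt_iff]
      simp only [ofLex_toLex]
      left
      rw [(key_facts_not_mem b hb').1]
      exact key_lt_four_of_mem a ha'

-- ===== VERDICT (by name: the statement is the Claim_ definition above) =====
theorem suggest_push_batches_py_spec : Claim_equal_suggest_push_batches_py := by
  intro cps _
  unfold Spec_suggest_push_batches_py
  rw [portA_eq, altB_eq, sorted2_eq_sorted_lex]
  exact main_eq _ (PySem.Set.nodup_ofList _)
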